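-- pv_equiv track=rewrite | github.com/narenndhra/BrokenAuthAnalyzer | broken_auth_analyzer.py | _is_static
-- ===== SOURCE A (Python) =====
-- STATIC_EXTS = (
--     ".js", ".css", ".png", ".jpg", ".jpeg", ".gif", ".svg", ".ico", ".webp",
--     ".woff", ".woff2", ".ttf", ".otf", ".map"
-- )
--
-- STATIC_CT_PREFIX = (
--     "text/css",
--     "application/javascript", "application/x-javascript", "text/javascript",
--     "image/",
--     "font/"
-- )
--
-- DYNAMIC_EXTS = (
--     ".php", ".phtml",
--     ".asp", ".aspx",
--     ".jsp", ".jspx",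
--     ".do", ".action",
--     ".cfm", ".cfml",
--     ".cgi", ".pl", ".rb", ".py", ".go"
-- )
--
-- def _is_static(method, url, ct):
--     if method != "GET": return False
--     try:
--         u = (url or "").lower()
--         for ext in DYNAMIC_EXTS:
--             if u.endswith(ext): return False
--         for ext in STATIC_EXTS:
--             if u.endswith(ext): return True
--         if ct:
--             for pref in STATIC_CT_PREFIX:
--                 if ct.startswith(pref): return True
--     except: pass
--     return False
-- ===== SOURCE B (Python) =====
-- STATIC_EXTS = (
--     ".js", ".css", ".png", ".jpg", ".jpeg", ".gif", ".svg", ".ico", ".webp",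
--     ".woff", ".woff2", ".ttf", ".otf", ".map"
-- )
--
-- STATIC_CT_PREFIX = (
--     "text/css",
--     "application/javascript", "application/x-javascript", "text/javascript",
--     "image/",
--     "font/"
-- )
--
-- DYNAMIC_EXTS = (
--     ".php", ".phtml",
--     ".asp", ".aspx",
--     ".jsp", ".jspx",
--     ".do", ".action",
--     ".cfm", ".cfml",
--     ".cgi", ".pl", ".rb", ".py", ".go"
-- )
--
-- DYNAMIC_SET = frozenset(DYNAMIC_EXTS)
-- STATIC_SET = frozenset(STATIC_EXTS)
--
--
-- def _last_ext(u):
--     """Characters from the last '.' (inclusive) to the end of u, or '' if no dot."""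
--     tail = []
--     for ch in reversed(u):
--         tail.append(ch)
--         if ch == '.':
--             return ''.join(reversed(tail))
--     return ''
--
--
-- def _is_static(method, url, ct):
--     if method != "GET":
--         return False
--     u = (url or "").lower()
--     ext = _last_ext(u)
--     if ext in DYNAMIC_SET:
--         return False
--     if ext in STATIC_SET:
--         return True
--     return bool(ct) and ct.startswith(STATIC_CT_PREFIX)
-- ===== Notes on version B (the rewrite author's own statement) =====
-- stated objective: alternative
-- what changed: Replaces the two endswith scans over all 29 extension tuples with a single reverse scan that extracts the last dotted extension once, then two O(1) frozenset membership tests; the content-type check becomes one tuple-argument startswith.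
import Mathlib
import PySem

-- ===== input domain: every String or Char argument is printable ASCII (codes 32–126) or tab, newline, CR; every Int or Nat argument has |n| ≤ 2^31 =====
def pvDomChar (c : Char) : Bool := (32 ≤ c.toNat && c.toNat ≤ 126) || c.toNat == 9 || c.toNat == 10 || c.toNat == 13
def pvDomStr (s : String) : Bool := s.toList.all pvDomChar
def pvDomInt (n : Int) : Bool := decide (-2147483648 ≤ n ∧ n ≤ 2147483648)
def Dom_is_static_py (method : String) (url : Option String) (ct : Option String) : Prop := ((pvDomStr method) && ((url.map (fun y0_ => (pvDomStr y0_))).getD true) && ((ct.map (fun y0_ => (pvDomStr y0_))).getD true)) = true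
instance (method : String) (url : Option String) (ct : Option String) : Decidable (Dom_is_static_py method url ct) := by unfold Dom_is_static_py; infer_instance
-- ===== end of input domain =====

-- B extracts the url's last dotted extension once by a reverse scan and uses set membership,
-- instead of A's two endswith loops over all 29 extensions (objective: alternative).

-- ===== PORT A =====
def staticExts : List String :=
  [".js", ".css", ".png", ".jpg", ".jpeg", ".gif", ".svg", ".ico", ".webp",
   ".woff", ".woff2", ".ttf", ".otf", ".map"]

def staticCtPrefix : List String :=
  ["text/css",
   "application/javascript", "application/x-javascript", "text/javascript",
   "image/",
   "font/"]

def dynamicExts : List String :=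
  [".php", ".phtml",
   ".asp", ".aspx",
   ".jsp", ".jspx",
   ".do", ".action",
   ".cfm", ".cfml",
   ".cgi", ".pl", ".rb", ".py", ".go"]

def is_static_py (method : String) (url : Option String) (ct : Option String) : Bool :=
  if method ≠ "GET" then false
  else
    let u := PySem.Str.lower (url.getD "")
    if dynamicExts.any (fun ext => PySem.Str.endswith u ext) then false
    else if staticExts.any (fun ext => PySem.Str.endswith u ext) then true
    else
      match ct with
      | some c => if c ≠ "" then staticCtPrefix.any (fun pref => PySem.Str.startswith c pref) else false
      | none => false

-- ===== PORT B =====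
def dynamicSet : PySem.Set String := PySem.Set.ofList dynamicExts
def staticSet : PySem.Set String := PySem.Set.ofList staticExts

-- _last_ext's reverse scan: on the REVERSED char list, collect up to and including the first '.'
def extRev : List Char → Option (List Char)
  | [] => none
  | c :: rest => if c = '.' then some [c] else (extRev rest).map (c :: ·)

def lastExt (u : String) : String :=
  String.ofList (((extRev u.toList.reverse).map List.reverse).getD [])

def is_static_py_alt (method : String) (url : Option String) (ct : Option String) : Bool :=
  if method ≠ "GET" then false
  else
    let u := PySem.Str.lower (url.getD "")
    let ext := lastExt u
    if PySem.Set.contains dynamicSet ext then false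
    else if PySem.Set.contains staticSet ext then true
    else
      match ct with
      | some c => (c ≠ "" : Bool) && staticCtPrefix.any (fun pref => PySem.Str.startswith c pref)
      | none => false

-- ===== PRECONDITION & SPEC =====
def Spec_is_static_py (method : String) (url : Option String) (ct : Option String) (out : Bool) : Prop := out = is_static_py_alt method url ct
instance (method : String) (url : Option String) (ct : Option String) (out : Bool) : Decidable (Spec_is_static_py method url ct out) := by unfold Spec_is_static_py; infer_instance

-- ===== CLAIM (what is proved, stated in full; the proofs are below) =====
def Claim_equal_is_static_py : Prop := ∀ (method : String) (url : Option String) (ct : Option String), Dom_is_static_py method url ct → Spec_is_static_py method url ct (is_static_py method url ct)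

-- ===== LEMMAS AND PROOFS =====

-- extRev finds exactly the suffixes of the form b ++ ['.'] (dot-free b): prefix on the reversed list
theorem extRev_eq_iff_prefix (b : List Char) (hb : '.' ∉ b) :
    ∀ r : List Char, extRev r = some (b ++ ['.']) ↔ (b ++ ['.']) <+: r := by
  induction b with
  | nil =>
    intro r
    induction r with
    | nil => simp [extRev]
    | cons c rest ih =>
      by_cases hc : c = '.'
      · subst hc; simp [extRev]
      · simp only [extRev, if_neg hc]
        constructor
        · intro h
          rcases Option.map_eq_some_iff.mp h with ⟨l, _, hl⟩
          cases hl; exact absurd rfl hc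
        · intro h
          rcases h with ⟨t, ht⟩
          cases ht; exact absurd rfl hc
  | cons a b' ih =>
    intro r
    have ha : a ≠ '.' := fun h => hb (h ▸ List.mem_cons_self)
    have hb' : '.' ∉ b' := fun h => hb (List.mem_cons_of_mem _ h)
    cases r with
    | nil => simp [extRev]
    | cons c rest =>
      by_cases hc : c = '.'
      · subst hc
        constructor
        · intro h
          simp [extRev] at h
        · intro h
          rw [List.cons_append, List.cons_prefix_cons] at h
          exact absurd h.1 ha
      · simp only [extRev, if_neg hc, List.cons_append, List.cons_prefix_cons,
          Option.map_eq_some_iff]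
        constructor
        · rintro ⟨l, hl, hcl⟩
          injection hcl with h1 h2
          subst h1
          subst h2
          exact ⟨rfl, (ih hb' rest).mp hl⟩
        · rintro ⟨h1, h2⟩
          subst h1
          exact ⟨b' ++ ['.'], (ih hb' rest).mpr h2, rfl⟩

-- endswith against a one-dot pattern equals comparing the extracted extension
theorem endswith_eq_lastExt (u : String) (body : List Char) (hb : '.' ∉ body) :
    PySem.Str.endswith u (String.ofList ('.' :: body)) = (lastExt u == String.ofList ('.' :: body)) := by
  have hiff : PySem.Chars.endswith u.toList ('.' :: body) = true ↔ ('.' :: body) <:+ u.toList :=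
    PySem.Chars.endswith_iff _ _
  have hsuff : ('.' :: body) <:+ u.toList ↔ (body.reverse ++ ['.']) <+: u.toList.reverse := by
    rw [← List.reverse_prefix]
    simp
  have hext : extRev u.toList.reverse = some (body.reverse ++ ['.']) ↔
      (body.reverse ++ ['.']) <+: u.toList.reverse :=
    extRev_eq_iff_prefix body.reverse (by simpa using hb) _
  have hbeq : (lastExt u == String.ofList ('.' :: body)) = true ↔
      extRev u.toList.reverse = some (body.reverse ++ ['.']) := by
    constructor
    · intro h
      have hstr : lastExt u = String.ofList ('.' :: body) := eq_of_beq h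
      unfold lastExt at hstr
      have hcl : ((extRev u.toList.reverse).map List.reverse).getD [] = '.' :: body := by
        have h2 := congrArg String.toList hstr
        simpa using h2
      cases hre : extRev u.toList.reverse with
      | none => rw [hre] at hcl; simp at hcl
      | some l =>
        rw [hre] at hcl
        simp only [Option.map_some, Option.getD_some] at hcl
        have hl : l = body.reverse ++ ['.'] := by
          have h3 := congrArg List.reverse hcl
          simpa using h3
        exact congrArg some hl
    · intro h
      have h2 : lastExt u = String.ofList ('.' :: body) := by
        unfold lastExt
        rw [h]
        simp
      simp [h2]
  have hgoal : PySem.Str.endswith u (String.ofList ('.' :: body)) = true ↔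
      (lastExt u == String.ofList ('.' :: body)) = true := by
    rw [PySem.Str.endswith_eq]
    have htl : (String.ofList ('.' :: body)).toList = '.' :: body := by simp
    rw [htl]
    exact hiff.trans (hsuff.trans (hext.symm.trans hbeq.symm))
  cases h1 : PySem.Str.endswith u (String.ofList ('.' :: body)) with
  | true => exact (hgoal.mp h1).symm
  | false =>
    cases h2 : (lastExt u == String.ofList ('.' :: body)) with
    | true => rw [hgoal.mpr h2] at h1; exact h1.symm ▸ rfl
    | false => rfl

-- the literal sets reduce to their literal lists
theorem dynamicSet_eq : dynamicSet = dynamicExts := by decide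
theorem staticSet_eq : staticSet = staticExts := by decide

-- ===== VERDICT (by name: the statement is the Claim_ definition above) =====
theorem is_static_py_spec : Claim_equal_is_static_py := by
  intro method url ct _
  unfold Spec_is_static_py is_static_py is_static_py_alt
  by_cases hm : method = "GET"
  · simp only [hm, ne_eq, not_true_eq_false, if_false]
    set u := PySem.Str.lower (url.getD "") with hu
    have hdyn : dynamicExts.any (fun ext => PySem.Str.endswith u ext)
        = PySem.Set.contains dynamicSet (lastExt u) := by
      rw [dynamicSet_eq]
      simp only [dynamicExts, List.any_cons, List.any_nil,
        PySem.Set.contains_eq_listContains, List.contains_cons,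
        List.elem_nil]
      rw [show (".php" : String) = String.ofList ('.' :: ['p','h','p']) from rfl,
          show (".phtml" : String) = String.ofList ('.' :: ['p','h','t','m','l']) from rfl,
          show (".asp" : String) = String.ofList ('.' :: ['a','s','p']) from rfl,
          show (".aspx" : String) = String.ofList ('.' :: ['a','s','p','x']) from rfl,
          show (".jsp" : String) = String.ofList ('.' :: ['j','s','p']) from rfl,
          show (".jspx" : String) = String.ofList ('.' :: ['j','s','p','x']) from rfl,
          show (".do" : String) = String.ofList ('.' :: ['d','o']) from rfl,
          show (".action" : String) = String.ofList ('.' :: ['a','c','t','i','o','n']) from rfl,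
          show (".cfm" : String) = String.ofList ('.' :: ['c','f','m']) from rfl,
          show (".cfml" : String) = String.ofList ('.' :: ['c','f','m','l']) from rfl,
          show (".cgi" : String) = String.ofList ('.' :: ['c','g','i']) from rfl,
          show (".pl" : String) = String.ofList ('.' :: ['p','l']) from rfl,
          show (".rb" : String) = String.ofList ('.' :: ['r','b']) from rfl,
          show (".py" : String) = String.ofList ('.' :: ['p','y']) from rfl,
          show (".go" : String) = String.ofList ('.' :: ['g','o']) from rfl]
      rw [endswith_eq_lastExt u _ (by decide), endswith_eq_lastExt u _ (by decide),
          endswith_eq_lastExt u _ (by decide), endswith_eq_lastExt u _ (by decide),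
          endswith_eq_lastExt u _ (by decide), endswith_eq_lastExt u _ (by decide),
          endswith_eq_lastExt u _ (by decide), endswith_eq_lastExt u _ (by decide),
          endswith_eq_lastExt u _ (by decide), endswith_eq_lastExt u _ (by decide),
          endswith_eq_lastExt u _ (by decide), endswith_eq_lastExt u _ (by decide),
          endswith_eq_lastExt u _ (by decide), endswith_eq_lastExt u _ (by decide),
          endswith_eq_lastExt u _ (by decide)]
    have hsta : staticExts.any (fun ext => PySem.Str.endswith u ext)
        = PySem.Set.contains staticSet (lastExt u) := by
      rw [staticSet_eq]
      simp only [staticExts, List.any_cons, List.any_nil,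
        PySem.Set.contains_eq_listContains, List.contains_cons,
        List.elem_nil]
      rw [show (".js" : String) = String.ofList ('.' :: ['j','s']) from rfl,
          show (".css" : String) = String.ofList ('.' :: ['c','s','s']) from rfl,
          show (".png" : String) = String.ofList ('.' :: ['p','n','g']) from rfl,
          show (".jpg" : String) = String.ofList ('.' :: ['j','p','g']) from rfl,
          show (".jpeg" : String) = String.ofList ('.' :: ['j','p','e','g']) from rfl,
          show (".gif" : String) = String.ofList ('.' :: ['g','i','f']) from rfl,
          show (".svg" : String) = String.ofList ('.' :: ['s','v','g']) from rfl,
          show (".ico" : String) = String.ofList ('.' :: ['i','c','o']) from rfl,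
          show (".webp" : String) = String.ofList ('.' :: ['w','e','b','p']) from rfl,
          show (".woff" : String) = String.ofList ('.' :: ['w','o','f','f']) from rfl,
          show (".woff2" : String) = String.ofList ('.' :: ['w','o','f','f','2']) from rfl,
          show (".ttf" : String) = String.ofList ('.' :: ['t','t','f']) from rfl,
          show (".otf" : String) = String.ofList ('.' :: ['o','t','f']) from rfl,
          show (".map" : String) = String.ofList ('.' :: ['m','a','p']) from rfl]
      rw [endswith_eq_lastExt u _ (by decide), endswith_eq_lastExt u _ (by decide),
          endswith_eq_lastExt u _ (by decide), endswith_eq_lastExt u _ (by decide),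
          endswith_eq_lastExt u _ (by decide), endswith_eq_lastExt u _ (by decide),
          endswith_eq_lastExt u _ (by decide), endswith_eq_lastExt u _ (by decide),
          endswith_eq_lastExt u _ (by decide), endswith_eq_lastExt u _ (by decide),
          endswith_eq_lastExt u _ (by decide), endswith_eq_lastExt u _ (by decide),
          endswith_eq_lastExt u _ (by decide), endswith_eq_lastExt u _ (by decide)]
    rw [hdyn, hsta]
    generalize PySem.Set.contains dynamicSet (lastExt u) = bd
    generalize PySem.Set.contains staticSet (lastExt u) = bs
    cases bd with
    | true => rfl
    | false =>
      cases bs with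
      | true => rfl
      | false =>
        simp only [Bool.false_eq_true, if_false]
        cases ct with
        | none => rfl
        | some c =>
          by_cases hc : c = ""
          · simp [hc]
          · simp [hc]
  · simp [hm]
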